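-- pv_equiv track=rewrite | github.com/hazemanwer2000/manytools | gui/scene-gazer/SharedUtils/Metadata.py | unionizeTags
-- ===== SOURCE A (Python) =====
-- from collections import OrderedDict
-- import copy
--
-- def unionizeTags(baseTags, extraTags) -> OrderedDict[str, list]:
--     '''
--     Return the union of two (sets of) tags.
--     '''
--     resultTags = copy.deepcopy(baseTags)
--
--     # ? Convert 'list' to 'set'.
--     for resultTagCategory in resultTags:
--         resultTags[resultTagCategory] = set(resultTags[resultTagCategory])
--
--     for extraTagCategory in extraTags:
--
--         if extraTagCategory not in resultTags:
--             resultTags[extraTagCategory] = set(extraTags[extraTagCategory])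
--         else:
--             resultTags[extraTagCategory] = resultTags[extraTagCategory].union(set(extraTags[extraTagCategory]))
--
--     # ? Sort tag(s) alphabetically.
--     # ? ? Sort tag categories.
--     resultTags = OrderedDict(sorted(resultTags.items(), key=lambda x: x[0]))
--     # ? ? Sort tag categories content.
--     for resultTagCategory in resultTags:
--         resultTags[resultTagCategory] = list(resultTags[resultTagCategory])
--         resultTags[resultTagCategory].sort()
--
--     return resultTags
-- ===== SOURCE B (Python) =====
-- from collections import OrderedDict
--
-- def unionizeTags(baseTags, extraTags):
--     '''
--     Return the union of two (sets of) tags.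
--     '''
--     # Result skeleton: every category, in sorted order, starts empty.
--     result = OrderedDict((c, []) for c in sorted(set(baseTags) | set(extraTags)))
--     # One global sort of all distinct (category, tag) pairs: lexicographic order
--     # groups pairs by category and puts each category's tags in sorted order.
--     pairs = sorted({(c, t) for d in (baseTags, extraTags) for c, ts in d.items() for t in ts})
--     # Single grouping scan.
--     for c, t in pairs:
--         result[c].append(t)
--     return result
-- ===== Notes on version B (the rewrite author's own statement) =====
-- stated objective: alternative
-- what changed: Instead of A's per-category processing (deepcopy, convert each value list to a set, merge the second dict key by key, then sort the dict and sort each value list separately), B does one global sort of all distinct (category, tag) pairs and a single grouping scan over it into a pre-built skeleton of sorted categories; lexicographic pair order makes each category's tags come out sorted.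
import Mathlib
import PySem

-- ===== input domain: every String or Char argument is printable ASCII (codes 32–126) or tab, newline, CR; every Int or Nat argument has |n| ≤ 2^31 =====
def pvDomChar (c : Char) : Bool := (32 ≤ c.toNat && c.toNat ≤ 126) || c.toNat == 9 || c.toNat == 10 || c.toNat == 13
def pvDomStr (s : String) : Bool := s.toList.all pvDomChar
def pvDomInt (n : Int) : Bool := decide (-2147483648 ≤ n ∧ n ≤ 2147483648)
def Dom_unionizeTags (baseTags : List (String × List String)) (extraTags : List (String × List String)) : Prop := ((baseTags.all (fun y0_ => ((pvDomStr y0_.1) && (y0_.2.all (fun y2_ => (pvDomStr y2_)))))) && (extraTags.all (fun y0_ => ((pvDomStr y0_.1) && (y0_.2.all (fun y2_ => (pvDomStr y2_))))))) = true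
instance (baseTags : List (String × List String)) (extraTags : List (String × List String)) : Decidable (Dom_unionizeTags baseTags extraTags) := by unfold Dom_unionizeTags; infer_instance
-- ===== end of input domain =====

-- ===== PORT A =====
-- B replaces A's deepcopy/convert/merge/re-sort dict pipeline by ONE global sort of all
-- distinct (category, tag) pairs followed by a grouping scan (objective: alternative).
def unionizeTags (baseTags : List (String × List String)) (extraTags : List (String × List String)) : List (String × List String) :=
  -- the dict arguments as PySem.Dicts; resultTags = copy.deepcopy(baseTags)
  let extra : PySem.Dict String (List String) := PySem.Dict.mk extraTags
  let resultTags0 : PySem.Dict String (List String) := PySem.Dict.mk baseTags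
  -- for resultTagCategory in resultTags: resultTags[c] = set(resultTags[c])
  let resultTags1 := resultTags0.keys.foldl
    (fun d c => d.insert c (PySem.Set.ofList (d.getD c []))) resultTags0
  -- for extraTagCategory in extraTags: if c not in resultTags: … else: …
  let resultTags2 := extra.keys.foldl
    (fun d c =>
      if d.contains c = false then
        d.insert c (PySem.Set.ofList (extra.getD c []))
      else
        d.insert c (PySem.Set.union (d.getD c []) (PySem.Set.ofList (extra.getD c []))))
    resultTags1
  -- resultTags = OrderedDict(sorted(resultTags.items(), key=lambda x: x[0]))
  let sortedItems := PySem.List.sorted resultTags2.items (fun x => x.1)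
  -- for c in resultTags: resultTags[c] = list(resultTags[c]); resultTags[c].sort()
  sortedItems.map (fun kv => (kv.1, PySem.List.sorted kv.2 (fun t => t)))

-- ===== PORT B =====
def unionizeTags_alt (baseTags : List (String × List String)) (extraTags : List (String × List String)) : List (String × List String) :=
  -- result = OrderedDict((c, []) for c in sorted(set(baseTags) | set(extraTags)))
  let cats := PySem.List.sorted
    (PySem.Set.union (PySem.Set.ofList (baseTags.map (fun p => p.1)))
                     (PySem.Set.ofList (extraTags.map (fun p => p.1)))) (fun c => c)
  let result0 : PySem.Dict String (List String) := PySem.Dict.mk (cats.map (fun c => (c, [])))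
  -- pairs = sorted({(c, t) for d in (baseTags, extraTags) for c, ts in d.items() for t in ts})
  -- (tuple sort = sorted2 with the two component keys)
  let pairs := PySem.List.sorted2
    (PySem.Set.ofList ((baseTags ++ extraTags).flatMap (fun p => p.2.map (fun t => (p.1, t)))))
    (fun p => p.1) (fun p => p.2)
  -- for c, t in pairs: result[c].append(t)   (every such c is already a key of result)
  let result := pairs.foldl (fun d p => d.modify p.1 [] (fun l => l ++ [p.2])) result0
  result.items

-- ===== PRECONDITION & SPEC =====
-- Pre_ excludes association lists with duplicate keys: they represent no Python dict input
-- (a dict's keys are unique), so neither behaviour on them is A's.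
def Pre_unionizeTags (baseTags : List (String × List String)) (extraTags : List (String × List String)) : Prop :=
  (baseTags.map (fun p => p.1)).Nodup ∧ (extraTags.map (fun p => p.1)).Nodup
instance (baseTags : List (String × List String)) (extraTags : List (String × List String)) : Decidable (Pre_unionizeTags baseTags extraTags) := by unfold Pre_unionizeTags; infer_instance
def pvWitness_unionizeTags : (List (String × List String)) × (List (String × List String)) :=
  ([("b", ["y", "x", "x"]), ("a", ["m"])], [("b", ["z"]), ("c", [])])
def Spec_unionizeTags (baseTags : List (String × List String)) (extraTags : List (String × List String)) (out : List (String × List String)) : Prop := out = unionizeTags_alt baseTags extraTags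
instance (baseTags : List (String × List String)) (extraTags : List (String × List String)) (out : List (String × List String)) : Decidable (Spec_unionizeTags baseTags extraTags out) := by unfold Spec_unionizeTags; infer_instance

-- ===== CLAIM (what is proved, stated in full; the proofs are below) =====
def Claim_equal_unionizeTags : Prop := ∀ (baseTags : List (String × List String)) (extraTags : List (String × List String)), Dom_unionizeTags baseTags extraTags → Pre_unionizeTags baseTags extraTags → Spec_unionizeTags baseTags extraTags (unionizeTags baseTags extraTags)

-- ===== LEMMAS AND PROOFS =====

-- the canonical value both programs are proved equal to
def pvCanon (baseTags : List (String × List String)) (extraTags : List (String × List String)) : List (String × List String) :=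
  (PySem.List.sorted
    (PySem.Set.union (PySem.Set.ofList (baseTags.map (fun p => p.1)))
                     (PySem.Set.ofList (extraTags.map (fun p => p.1)))) (fun c => c)).map
    (fun c =>
      (c, PySem.List.sorted
            (PySem.Set.union (PySem.Set.ofList ((PySem.Dict.mk baseTags).getD c []))
                             (PySem.Set.ofList ((PySem.Dict.mk extraTags).getD c []))) (fun t => t)))

-- updating a set with its own elements changes nothing
theorem pvSet_update_self (s : List String) : PySem.Set.update s s = s := by
  rw [PySem.Set.update_eq_append_filter]
  have h : List.filter (fun y => !PySem.Set.contains s y) (PySem.Set.ofList s) = [] := by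
    apply List.filter_eq_nil_iff.mpr
    intro a ha
    have h2 : a ∈ s := (PySem.Set.mem_ofList s a).mp ha
    simp
    exact h2
  simp only [h, List.append_nil]

-- value of the first loop (convert each value to a set) at any key
theorem pvFold1_getD (l : List String) (hl : l.Nodup) (d : PySem.Dict String (List String)) (j : String) :
    (l.foldl (fun d c => d.insert c (PySem.Set.ofList (d.getD c []))) d).getD j [] =
      if j ∈ l then PySem.Set.ofList (d.getD j []) else d.getD j [] := by
  induction l generalizing d with
  | nil => simp
  | cons x xs ih =>
    rcases List.nodup_cons.mp hl with ⟨hx, hxs⟩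
    simp only [List.foldl_cons]
    rw [ih hxs]
    by_cases hj : j = x
    · subst hj
      simp [hx, PySem.Dict.getD_insert_self]
    · rw [PySem.Dict.getD_insert_of_ne _ _ _ hj]
      simp [hj]

-- value of the merge loop at any key
theorem pvFold2_getD (E : PySem.Dict String (List String)) (l : List String) (hl : l.Nodup)
    (d : PySem.Dict String (List String)) (j : String) :
    (l.foldl (fun d c =>
        if d.contains c = false then
          d.insert c (PySem.Set.ofList (E.getD c []))
        else
          d.insert c (PySem.Set.union (d.getD c []) (PySem.Set.ofList (E.getD c [])))) d).getD j [] =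
      if j ∈ l then
        (if d.contains j = false then PySem.Set.ofList (E.getD j [])
         else PySem.Set.union (d.getD j []) (PySem.Set.ofList (E.getD j []))) else d.getD j [] := by
  induction l generalizing d with
  | nil => simp
  | cons x xs ih =>
    rcases List.nodup_cons.mp hl with ⟨hx, hxs⟩
    simp only [List.foldl_cons]
    rw [ih hxs]
    by_cases hj : j = x
    · subst hj
      by_cases hc : d.contains j = false <;> simp [hc, hx, PySem.Dict.getD_insert_self]
    · by_cases hc : d.contains x = false <;>
        simp [hc, hj, PySem.Dict.getD_insert_of_ne _ _ _ hj, PySem.Dict.contains_insert]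

-- the merge loop's step, rewritten so the insert is outermost (for the keys lemma)
theorem pvFold2_step_eq (E : PySem.Dict String (List String)) :
    (fun (d : PySem.Dict String (List String)) (c : String) =>
      if d.contains c = false then
        d.insert c (PySem.Set.ofList (E.getD c []))
      else
        d.insert c (PySem.Set.union (d.getD c []) (PySem.Set.ofList (E.getD c [])))) =
    (fun d c => d.insert c
      (if d.contains c = false then PySem.Set.ofList (E.getD c [])
       else PySem.Set.union (d.getD c []) (PySem.Set.ofList (E.getD c [])))) := by
  funext d c
  by_cases h : d.contains c = false <;> simp [h]

-- Pairwise ≤ plus Nodup gives Pairwise <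
theorem pvPairwise_lt_of_le_nodup (l : List String)
    (h1 : l.Pairwise (fun a b => a ≤ b)) (h2 : l.Nodup) :
    l.Pairwise (fun a b => a < b) := by
  have := List.Pairwise.and h1 h2
  exact this.imp (fun h => lt_of_le_of_ne h.1 h.2)

-- A's pipeline returns the canonical value
theorem pvA_eq_canon (baseTags : List (String × List String)) (extraTags : List (String × List String))
    (hPre : Pre_unionizeTags baseTags extraTags) :
    unionizeTags baseTags extraTags = pvCanon baseTags extraTags := by
  unfold unionizeTags pvCanon
  rcases hPre with ⟨hB, hE⟩
  set B0 : PySem.Dict String (List String) := PySem.Dict.mk baseTags with hB0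
  set E : PySem.Dict String (List String) := PySem.Dict.mk extraTags with hEdef
  have hBkeys : B0.keys = baseTags.map (fun p => p.1) := PySem.Dict.keys_mk baseTags
  have hEkeys : E.keys = extraTags.map (fun p => p.1) := PySem.Dict.keys_mk extraTags
  have hBnd : B0.keys.Nodup := by rw [hBkeys]; exact hB
  have hEnd : E.keys.Nodup := by rw [hEkeys]; exact hE
  set d1 := B0.keys.foldl (fun d c => d.insert c (PySem.Set.ofList (d.getD c []))) B0 with hd1
  set d2 := E.keys.foldl (fun d c =>
      if d.contains c = false then
        d.insert c (PySem.Set.ofList (E.getD c []))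
      else
        d.insert c (PySem.Set.union (d.getD c []) (PySem.Set.ofList (E.getD c [])))) d1 with hd2
  -- keys of the intermediate dicts
  have hd1keys : d1.keys = B0.keys := by
    rw [hd1, PySem.Dict.keys_foldl_insert, pvSet_update_self]
  have hd2keys : d2.keys = PySem.Set.update B0.keys E.keys := by
    rw [hd2, pvFold2_step_eq, PySem.Dict.keys_foldl_insert, hd1keys]
  have hd2nd : d2.keys.Nodup := by
    rw [hd2keys]; exact PySem.Set.nodup_update _ _ hBnd
  -- values
  have hd1v : ∀ j, d1.getD j [] = if j ∈ B0.keys then PySem.Set.ofList (B0.getD j []) else [] := by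
    intro j
    rw [hd1, pvFold1_getD _ hBnd]
    by_cases hj : j ∈ B0.keys
    · simp [hj]
    · have : B0.contains j = false := by
        rw [PySem.Dict.contains_eq_decide_mem_keys]
        simp [hj]
      simp [hj, PySem.Dict.getD_of_not_contains _ _ this]
  have hd1c : ∀ j, d1.contains j = B0.contains j := by
    intro j
    rw [PySem.Dict.contains_eq_decide_mem_keys, PySem.Dict.contains_eq_decide_mem_keys, hd1keys]
  have hd2v : ∀ j, d2.getD j [] =
      if j ∈ E.keys then
        (if d1.contains j = false then PySem.Set.ofList (E.getD j [])
         else PySem.Set.union (d1.getD j []) (PySem.Set.ofList (E.getD j []))) else d1.getD j [] := by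
    intro j
    rw [hd2, pvFold2_getD E _ hEnd d1 j]
  -- sorting the items by key = sorting the keys and reading each value off
  have hItems : PySem.List.sorted d2.items (fun x => x.1) =
      (PySem.List.sorted d2.keys (fun k => k)).map (fun k => (k, d2.getD k [])) := by
    apply PySem.List.sorted_eq_of_perm_of_pairwise_lt
    · rw [PySem.Dict.items_eq_map_keys d2 hd2nd []]
      exact (PySem.List.sorted_perm d2.keys (fun k => k) false).map _
    · rw [List.pairwise_map]
      exact pvPairwise_lt_of_le_nodup _ (PySem.List.sorted_pairwise _ _)
        ((PySem.List.sorted_perm d2.keys (fun k => k) false).nodup_iff.mpr hd2nd)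
  -- the key lists are permutations, so their sorts agree
  have hkeysPerm : d2.keys.Perm
      (PySem.Set.union (PySem.Set.ofList (baseTags.map (fun p => p.1)))
                       (PySem.Set.ofList (extraTags.map (fun p => p.1)))) := by
    apply (List.perm_ext_iff_of_nodup hd2nd
      (PySem.Set.nodup_union _ _ (PySem.Set.nodup_ofList _))).mpr
    intro a
    rw [hd2keys]
    simp [PySem.Set.union, PySem.Set.mem_update, PySem.Set.mem_ofList, hBkeys, hEkeys]
  have hsortedKeys : PySem.List.sorted d2.keys (fun k => k) =
      PySem.List.sorted
        (PySem.Set.union (PySem.Set.ofList (baseTags.map (fun p => p.1)))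
                         (PySem.Set.ofList (extraTags.map (fun p => p.1)))) (fun k => k) :=
    (PySem.List.sorted_id_eq_sorted_id_iff_perm _ _).mpr hkeysPerm
  show (PySem.List.sorted d2.items (fun x => x.1)).map
        (fun kv => (kv.1, PySem.List.sorted kv.2 (fun t => t))) = _
  rw [hItems, List.map_map, hsortedKeys]
  apply List.map_congr_left
  intro c hc
  have hc' : c ∈ baseTags.map (fun p => p.1) ∨ c ∈ extraTags.map (fun p => p.1) := by
    simpa [PySem.List.mem_sorted, PySem.Set.union, PySem.Set.mem_update,
      PySem.Set.mem_ofList] using hc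
  have hval : d2.getD c [] =
      PySem.Set.union (PySem.Set.ofList (B0.getD c []))
                      (PySem.Set.ofList (E.getD c [])) := by
    rw [hd2v c]
    by_cases hcE : c ∈ E.keys
    · rw [if_pos hcE]
      by_cases hcB : c ∈ B0.keys
      · have h1 : d1.contains c = true := by
          rw [hd1c, PySem.Dict.contains_eq_decide_mem_keys]; simp [hcB]
        rw [h1]
        simp only [Bool.true_eq_false, if_false]
        rw [hd1v c, if_pos hcB]
      · have h1 : d1.contains c = false := by
          rw [hd1c, PySem.Dict.contains_eq_decide_mem_keys]; simp [hcB]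
        rw [h1, if_pos rfl]
        have hBv : B0.getD c [] = [] := by
          apply PySem.Dict.getD_of_not_contains
          rw [PySem.Dict.contains_eq_decide_mem_keys]; simp [hcB]
        rw [hBv]
        show PySem.Set.ofList (E.getD c []) =
          PySem.Set.update (PySem.Set.ofList ([] : List String)) (PySem.Set.ofList (E.getD c []))
        rw [PySem.Set.ofList_nil, PySem.Set.update_nil_left, PySem.Set.ofList_ofList]
    · rw [if_neg hcE]
      have hcB : c ∈ B0.keys := by
        rw [hBkeys]
        rcases hc' with h | h
        · exact h
        · exact absurd (by rw [hEkeys]; exact h) hcE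
      have hEv : E.getD c [] = [] := by
        apply PySem.Dict.getD_of_not_contains
        rw [PySem.Dict.contains_eq_decide_mem_keys]; simp [hcE]
      rw [hd1v c, if_pos hcB, hEv]
      show PySem.Set.ofList (B0.getD c []) =
        PySem.Set.update (PySem.Set.ofList (B0.getD c [])) (PySem.Set.ofList ([] : List String))
      rw [PySem.Set.ofList_nil, PySem.Set.update_nil]
  simp only [Function.comp, hval]

-- the lexicographic relation Python's tuple sort orders by
def pvLexLE (a b : String × String) : Prop := a.1 < b.1 ∨ (a.1 = b.1 ∧ a.2 ≤ b.2)

theorem pvLexLE_trans {a b c : String × String} (h1 : pvLexLE a b) (h2 : pvLexLE b c) : pvLexLE a c := by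
  unfold pvLexLE at *
  rcases h1 with h1 | ⟨h1, h1'⟩ <;> rcases h2 with h2 | ⟨h2, h2'⟩
  · exact Or.inl (lt_trans h1 h2)
  · exact Or.inl (h2 ▸ h1)
  · exact Or.inl (h1 ▸ h2)
  · exact Or.inr ⟨h1.trans h2, le_trans h1' h2'⟩

-- inserting into a lex-sorted pair list keeps it lex-sorted
theorem pvInsertBy_lex_pairwise (x : String × String) (ys : List (String × String))
    (h : ys.Pairwise pvLexLE) :
    (PySem.List.insertBy
      (fun a b => decide (a.1 < b.1) || (!decide (b.1 < a.1) && decide (a.2 < b.2))) x ys).Pairwise pvLexLE := by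
  induction ys with
  | nil => simp [PySem.List.insertBy, pvLexLE]
  | cons y ys ih =>
    rcases List.pairwise_cons.mp h with ⟨hy, hys⟩
    rw [PySem.List.insertBy]
    by_cases hb : (decide (x.1 < y.1) || (!decide (y.1 < x.1) && decide (x.2 < y.2))) = true
    · rw [if_pos hb]
      have hxy : pvLexLE x y := by
        simp only [Bool.or_eq_true, Bool.and_eq_true, Bool.not_eq_true', decide_eq_true_eq,
          decide_eq_false_iff_not] at hb
        rcases hb with h1 | ⟨h1, h2⟩
        · exact Or.inl h1
        · rcases lt_trichotomy x.1 y.1 with h3 | h3 | h3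
          · exact Or.inl h3
          · exact Or.inr ⟨h3, le_of_lt h2⟩
          · exact absurd h3 h1
      refine List.pairwise_cons.mpr ⟨?_, h⟩
      intro z hz
      rcases List.mem_cons.mp hz with rfl | hz
      · exact hxy
      · exact pvLexLE_trans hxy (hy z hz)
    · rw [if_neg hb]
      have hyx : pvLexLE y x := by
        simp only [Bool.or_eq_true, Bool.and_eq_true, Bool.not_eq_true', decide_eq_true_eq,
          decide_eq_false_iff_not, not_or, not_and] at hb
        rcases hb with ⟨h1, h2⟩
        by_cases h3 : y.1 < x.1
        · exact Or.inl h3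
        · have heq : y.1 = x.1 := le_antisymm (le_of_not_gt h1) (le_of_not_gt h3)
          exact Or.inr ⟨heq, le_of_not_gt (h2 h3)⟩
      refine List.pairwise_cons.mpr ⟨?_, ih hys⟩
      intro z hz
      rcases (PySem.List.insertBy_mem_iff _ _ _ _).mp hz with rfl | hz
      · exact hyx
      · exact hy z hz

-- Python's tuple sort (sorted2 by both components) yields a lex-sorted list
theorem pvSorted2_lex_pairwise (xs : List (String × String)) :
    (PySem.List.sorted2 xs (fun p => p.1) (fun p => p.2) false).Pairwise pvLexLE := by
  have h : ∀ (acc : List (String × String)), acc.Pairwise pvLexLE →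
      (xs.foldl (fun acc x => PySem.List.insertBy
        (fun a b => decide (a.1 < b.1) || (!decide (b.1 < a.1) && decide (a.2 < b.2))) x acc) acc).Pairwise pvLexLE := by
    induction xs with
    | nil => intro acc hacc; exact hacc
    | cons x xs ih =>
      intro acc hacc
      exact ih _ (pvInsertBy_lex_pairwise x acc hacc)
  exact h [] List.Pairwise.nil

-- membership in an assoc list with nodup keys, read through the dict
theorem pvMem_getD_mk (l : List (String × List String)) (hnd : (l.map (fun p => p.1)).Nodup)
    (c : String) (t : String) :
    t ∈ (PySem.Dict.mk l).getD c [] ↔ ∃ q ∈ l, q.1 = c ∧ t ∈ q.2 := by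
  induction l with
  | nil =>
    simp [PySem.Dict.getD_eq_get?_getD, PySem.Dict.get?]
  | cons p rest ih =>
    rw [List.map_cons] at hnd
    rcases List.nodup_cons.mp hnd with ⟨hp, hrest⟩
    have hstep : (PySem.Dict.mk (p :: rest)).get? c =
        if p.1 == c then some p.2 else (PySem.Dict.mk rest).get? c := by
      have := PySem.Dict.get?_mk_cons (k := p.1) (v := p.2) (rest := rest) (x := c)
      simpa using this
    by_cases hc : p.1 = c
    · subst hc
      rw [PySem.Dict.getD_eq_get?_getD, hstep]
      simp only [beq_self_eq_true, if_true, Option.getD_some]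
      constructor
      · intro ht; exact ⟨p, List.mem_cons_self, rfl, ht⟩
      · rintro ⟨q, hq, hq1, hqt⟩
        rcases List.mem_cons.mp hq with rfl | hq
        · exact hqt
        · exact absurd (hq1 ▸ List.mem_map.mpr ⟨q, hq, rfl⟩ : p.1 ∈ rest.map (fun p => p.1)) hp
    · rw [PySem.Dict.getD_eq_get?_getD, hstep]
      rw [if_neg (by simpa using hc)]
      rw [← PySem.Dict.getD_eq_get?_getD]
      rw [ih hrest]
      constructor
      · rintro ⟨q, hq, hq1, hqt⟩; exact ⟨q, List.mem_cons_of_mem _ hq, hq1, hqt⟩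
      · rintro ⟨q, hq, hq1, hqt⟩
        rcases List.mem_cons.mp hq with rfl | hq
        · exact absurd hq1 hc
        · exact ⟨q, hq, hq1, hqt⟩

-- B's global-sort-and-group pipeline returns the canonical value
theorem pvB_eq_canon (baseTags : List (String × List String)) (extraTags : List (String × List String))
    (hPre : Pre_unionizeTags baseTags extraTags) :
    unionizeTags_alt baseTags extraTags = pvCanon baseTags extraTags := by
  unfold unionizeTags_alt pvCanon
  rcases hPre with ⟨hB, hE⟩
  set cats := PySem.List.sorted
    (PySem.Set.union (PySem.Set.ofList (baseTags.map (fun p => p.1)))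
                     (PySem.Set.ofList (extraTags.map (fun p => p.1)))) (fun c => c) with hcats
  set allPairs := (baseTags ++ extraTags).flatMap (fun p => p.2.map (fun t => (p.1, t))) with hallPairs
  set pairs := PySem.List.sorted2 (PySem.Set.ofList allPairs) (fun p => p.1) (fun p => p.2) with hpairs
  set result0 : PySem.Dict String (List String) := PySem.Dict.mk (cats.map (fun c => (c, []))) with hres0
  have hcatsNd : cats.Nodup :=
    (PySem.List.sorted_perm _ _ false).nodup_iff.mpr
      (PySem.Set.nodup_union _ _ (PySem.Set.nodup_ofList _))
  have hpairsPerm : pairs.Perm (PySem.Set.ofList allPairs) := PySem.List.sorted2_perm _ _ _ _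
  have hpairsNd : pairs.Nodup := hpairsPerm.nodup_iff.mpr (PySem.Set.nodup_ofList _)
  have hmem_pairs : ∀ p : String × String, p ∈ pairs ↔
      ∃ q ∈ baseTags ++ extraTags, q.1 = p.1 ∧ p.2 ∈ q.2 := by
    intro p
    rw [hpairsPerm.mem_iff, PySem.Set.mem_ofList, hallPairs, List.mem_flatMap]
    constructor
    · rintro ⟨q, hq, hpq⟩
      rcases List.mem_map.mp hpq with ⟨t, ht, hpt⟩
      cases hpt
      exact ⟨q, hq, rfl, ht⟩
    · rintro ⟨q, hq, hq1, hq2⟩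
      exact ⟨q, hq, List.mem_map.mpr ⟨p.2, hq2, by rw [hq1]⟩⟩
  -- every pair's category is one of cats
  have hfst_cats : ∀ p : String × String, p ∈ pairs → p.1 ∈ cats := by
    intro p hp
    rcases (hmem_pairs p).mp hp with ⟨q, hq, hq1, _⟩
    rw [hcats]
    simp only [PySem.List.mem_sorted, PySem.Set.union, PySem.Set.mem_update, PySem.Set.mem_ofList]
    rcases List.mem_append.mp hq with h | h
    · exact Or.inl (List.mem_map.mpr ⟨q, h, hq1⟩)
    · exact Or.inr (List.mem_map.mpr ⟨q, h, hq1⟩)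
  -- the grouping fold keeps exactly the keys cats
  set result := pairs.foldl (fun d p => d.modify p.1 [] (fun l => l ++ [p.2])) result0 with hresult
  have hres0keys : result0.keys = cats := by
    rw [hres0, PySem.Dict.keys_mk, List.map_map]
    exact List.map_id' cats
  have hreskeys : result.keys = cats := by
    rw [hresult, PySem.Dict.keys_foldl_modify_key, hres0keys,
      PySem.Set.update_eq_append_filter]
    have : List.filter (fun y => !PySem.Set.contains cats y)
        (PySem.Set.ofList (pairs.map (fun p => p.1))) = [] := by
      apply List.filter_eq_nil_iff.mpr
      intro a ha
      have ha' : a ∈ pairs.map (fun p => p.1) := (PySem.Set.mem_ofList _ _).mp ha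
      rcases List.mem_map.mp ha' with ⟨p, hp, rfl⟩
      simp [hfst_cats p hp]
    rw [this, List.append_nil]
  have hresNd : result.keys.Nodup := by rw [hreskeys]; exact hcatsNd
  -- value of the grouping fold at each category
  have hresv : ∀ c ∈ cats, result.getD c [] = (pairs.filter (fun p => p.1 == c)).map (fun p => p.2) := by
    intro c hc
    rw [hresult, PySem.Dict.getD_foldl_modify_append]
    have h0 : result0.getD c [] = [] := by
      apply PySem.Dict.getD_of_mem_items
      · rw [hres0]
        show (c, ([] : List String)) ∈ cats.map (fun c => (c, []))
        exact List.mem_map.mpr ⟨c, hc, rfl⟩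
      · rw [hres0keys]; exact hcatsNd
    rw [h0, List.nil_append]
  -- items of the result, read off the keys
  have hitems : result.items = cats.map (fun c => (c, result.getD c [])) := by
    rw [PySem.Dict.items_eq_map_keys result hresNd [], hreskeys]
  show result.items = _
  rw [hitems]
  apply List.map_congr_left
  intro c hc
  rw [hresv c hc]
  -- the grouped slice is exactly the sorted union of the two value sets
  refine congrArg (fun l => (c, l)) ?_
  symm
  apply PySem.List.sorted_eq_of_perm_of_pairwise_lt
  · -- permutation with the union of value sets
    apply (List.perm_ext_iff_of_nodup ?_ (PySem.Set.nodup_union _ _ (PySem.Set.nodup_ofList _))).mpr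
    · intro t
      simp only [List.mem_map, List.mem_filter, PySem.Set.union, PySem.Set.mem_update,
        PySem.Set.mem_ofList]
      rw [pvMem_getD_mk baseTags hB c t, pvMem_getD_mk extraTags hE c t]
      constructor
      · rintro ⟨p, ⟨hp, hpc⟩, rfl⟩
        have hc' : p.1 = c := by simpa using hpc
        rcases (hmem_pairs p).mp hp with ⟨q, hq, hq1, hq2⟩
        rcases List.mem_append.mp hq with h | h
        · exact Or.inl ⟨q, h, by rw [hq1, hc'], hq2⟩
        · exact Or.inr ⟨q, h, by rw [hq1, hc'], hq2⟩
      · intro h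
        have : ∃ q ∈ baseTags ++ extraTags, q.1 = c ∧ t ∈ q.2 := by
          rcases h with ⟨q, hq, hq1, hq2⟩ | ⟨q, hq, hq1, hq2⟩
          · exact ⟨q, List.mem_append.mpr (Or.inl hq), hq1, hq2⟩
          · exact ⟨q, List.mem_append.mpr (Or.inr hq), hq1, hq2⟩
        rcases this with ⟨q, hq, hq1, hq2⟩
        refine ⟨(c, t), ⟨(hmem_pairs (c, t)).mpr ⟨q, hq, hq1, hq2⟩, by simp⟩, rfl⟩
    · -- the mapped slice has no duplicates
      apply List.Nodup.map_on
      · intro x hx y hy hxy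
        have hxc : x.1 = c := by simpa using (List.mem_filter.mp hx).2
        have hyc : y.1 = c := by simpa using (List.mem_filter.mp hy).2
        exact Prod.ext (hxc.trans hyc.symm) hxy
      · exact hpairsNd.filter _
  · -- the mapped slice is strictly increasing
    have hlex : (pairs.filter (fun p => p.1 == c)).Pairwise pvLexLE :=
      (pvSorted2_lex_pairwise _).filter _
    have hle : ((pairs.filter (fun p => p.1 == c)).map (fun p => p.2)).Pairwise
        (fun a b => a ≤ b) := by
      rw [List.pairwise_map]
      refine hlex.imp_of_mem ?_
      intro a b ha hb hab
      have hac : a.1 = c := by simpa using (List.mem_filter.mp ha).2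
      have hbc : b.1 = c := by simpa using (List.mem_filter.mp hb).2
      rcases hab with h | ⟨_, h⟩
      · rw [hac, hbc] at h; exact absurd h (lt_irrefl _)
      · exact h
    have hnd : ((pairs.filter (fun p => p.1 == c)).map (fun p => p.2)).Nodup := by
      apply List.Nodup.map_on
      · intro x hx y hy hxy
        have hxc : x.1 = c := by simpa using (List.mem_filter.mp hx).2
        have hyc : y.1 = c := by simpa using (List.mem_filter.mp hy).2
        exact Prod.ext (hxc.trans hyc.symm) hxy
      · exact hpairsNd.filter _
    exact pvPairwise_lt_of_le_nodup _ hle hnd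

-- ===== VERDICT (by name: the statement is the Claim_ definition above) =====
theorem unionizeTags_spec : Claim_equal_unionizeTags := by
  intro baseTags extraTags _hDom hPre
  unfold Spec_unionizeTags
  rw [pvA_eq_canon baseTags extraTags hPre, pvB_eq_canon baseTags extraTags hPre]
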